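-- pv_equiv track=rewrite | github.com/CobaschiAser/Personal_Projects | Chess Explained/ChessExplained/back/utils/board_utils.py | is_valid_fen
-- ===== SOURCE A (Python) =====
-- def is_valid_fen(fen_str):
--     # Split the FEN string into its components
--     fen_parts = fen_str.split()
--
--     # Check if there are exactly 6 parts
--     if len(fen_parts) != 6:
--         return False
--
--     # Check the first field (piece placement)
--     if not all(ch in 'rnbqkpRNBQKP/' or ch.isdigit() for ch in fen_parts[0]):
--         return False
--
--     # Check the second field (active color)
--     if fen_parts[1] not in {'w', 'b'}:
--         return False
--
--     # Check the third field (castling availability)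
--     if not all(ch in '-KkQq' for ch in fen_parts[2]):
--         return False
--
--     # Check the fourth field (en passant target square)
--     if not (fen_parts[3] == '-' or (
--             len(fen_parts[3]) == 2 and fen_parts[3][0] in 'abcdefgh' and fen_parts[3][1] in '12345678')):
--         return False
--
--     # Check the fifth field (halfmove clock)
--     if not fen_parts[4].isdigit():
--         return False
--
--     # Check the sixth field (fullmove number)
--     if not fen_parts[5].isdigit():
--         return False
--
--     # If all checks pass, the FEN string is valid
--     return True
-- ===== SOURCE B (Python) =====
-- def is_valid_fen(fen_str):
--     # Single pass over the characters: a hand-rolled whitespace tokenizer that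
--     # validates each field the moment it is flushed, never building a parts list.
--     def ok_field(k, tok):
--         if k == 0:
--             return all(ch in 'rnbqkpRNBQKP/' or ch.isdigit() for ch in tok)
--         if k == 1:
--             return tok == 'w' or tok == 'b'
--         if k == 2:
--             return all(ch in '-KkQq' for ch in tok)
--         if k == 3:
--             return tok == '-' or (len(tok) == 2 and tok[0] in 'abcdefgh'
--                                   and tok[1] in '12345678')
--         return tok.isdigit()  # fields 4 and 5
--     k, cur, good = 0, '', True
--     for ch in fen_str:
--         if ch.isspace():
--             if cur:
--                 good = good and k < 6 and ok_field(k, cur)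
--                 k, cur = k + 1, ''
--         else:
--             cur += ch
--     if cur:
--         good = good and k < 6 and ok_field(k, cur)
--         k += 1
--     return good and k == 6
-- ===== Notes on version B (the rewrite author's own statement) =====
-- stated objective: alternative
-- what changed: Replaces split()-into-a-list followed by six sequential if/return guards with a single character-level pass: a hand-rolled whitespace tokenizer that validates each field as it is flushed (dispatching on the field index) and counts fields, never materializing the list of parts.
import Mathlib
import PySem

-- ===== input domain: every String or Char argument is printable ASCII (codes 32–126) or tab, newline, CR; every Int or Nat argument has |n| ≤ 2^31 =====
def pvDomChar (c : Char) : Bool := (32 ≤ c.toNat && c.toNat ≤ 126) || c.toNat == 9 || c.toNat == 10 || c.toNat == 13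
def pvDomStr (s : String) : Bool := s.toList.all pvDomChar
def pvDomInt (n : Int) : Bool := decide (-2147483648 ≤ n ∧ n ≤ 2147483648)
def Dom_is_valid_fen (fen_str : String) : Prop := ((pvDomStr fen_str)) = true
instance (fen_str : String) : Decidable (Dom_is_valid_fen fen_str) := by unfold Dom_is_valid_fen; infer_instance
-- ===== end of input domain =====

-- B replaces A's split()-then-six-guards with a single character-level pass: a
-- hand-rolled whitespace tokenizer validating each field as it is flushed (objective: alternative).


-- ===== PORT A =====
-- Literal transliteration of A: split, length guard, then six early-return guards.
-- fen_parts[i] is ported with pyGetD (in range after the length guard, so exact);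
-- fen_parts[3][0]/[1] with pyGet? under the short-circuiting len == 2 guard, as in Python.
def is_valid_fen (fen_str : String) : Bool :=
  let fen_parts := PySem.Str.split₀ fen_str
  if fen_parts.length != 6 then false
  else if !((PySem.List.pyGetD fen_parts 0 "").toList.all
      (fun ch => "rnbqkpRNBQKP/".toList.contains ch || PySem.Chars.isdigit ch)) then false
  else if !((PySem.List.pyGetD fen_parts 1 "") == "w" || (PySem.List.pyGetD fen_parts 1 "") == "b") then false
  else if !((PySem.List.pyGetD fen_parts 2 "").toList.all
      (fun ch => "-KkQq".toList.contains ch)) then false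
  else if !((PySem.List.pyGetD fen_parts 3 "") == "-" ||
      (PySem.Str.len (PySem.List.pyGetD fen_parts 3 "") == 2 &&
       (match PySem.Str.pyGet? (PySem.List.pyGetD fen_parts 3 "") 0 with
        | some c => "abcdefgh".toList.contains c | none => false) &&
       (match PySem.Str.pyGet? (PySem.List.pyGetD fen_parts 3 "") 1 with
        | some c => "12345678".toList.contains c | none => false))) then false
  else if !(PySem.Str.strIsdigit (PySem.List.pyGetD fen_parts 4 "")) then false
  else if !(PySem.Str.strIsdigit (PySem.List.pyGetD fen_parts 5 "")) then false
  else true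

-- ===== PORT B =====
-- Source B's ok_field(k, tok), on the token's characters.
def pvOkField (k : Nat) (tok : List Char) : Bool :=
  if k == 0 then tok.all (fun ch => "rnbqkpRNBQKP/".toList.contains ch || PySem.Chars.isdigit ch)
  else if k == 1 then tok == "w".toList || tok == "b".toList
  else if k == 2 then tok.all (fun ch => "-KkQq".toList.contains ch)
  else if k == 3 then tok == "-".toList ||
      (tok.length == 2 &&
       (match PySem.List.pyGet? tok 0 with | some c => "abcdefgh".toList.contains c | none => false) &&
       (match PySem.List.pyGet? tok 1 with | some c => "12345678".toList.contains c | none => false))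
  else PySem.Chars.strIsdigit tok

-- Source B's for-loop: state (k, cur, good) threaded over the characters.
def pvLoop : List Char → Nat → List Char → Bool → Nat × List Char × Bool
  | [], k, cur, good => (k, cur, good)
  | c :: rest, k, cur, good =>
    if PySem.Chars.isspace c then
      if cur.isEmpty then pvLoop rest k cur good
      else pvLoop rest (k + 1) [] (good && decide (k < 6) && pvOkField k cur)
    else pvLoop rest k (cur ++ [c]) good

-- Source B's final flush and 'good and k == 6'.
def is_valid_fen_alt (fen_str : String) : Bool :=
  let st := pvLoop fen_str.toList 0 [] true
  let k := st.1
  let cur := st.2.1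
  let good := st.2.2
  if cur.isEmpty then good && (k == 6)
  else (good && decide (k < 6) && pvOkField k cur) && (k + 1 == 6)

-- ===== PRECONDITION & SPEC =====
def Spec_is_valid_fen (fen_str : String) (out : Bool) : Prop := out = is_valid_fen_alt fen_str
instance (fen_str : String) (out : Bool) : Decidable (Spec_is_valid_fen fen_str out) := by unfold Spec_is_valid_fen; infer_instance

-- ===== CLAIM =====
def Claim_equal_is_valid_fen : Prop := ∀ (fen_str : String), Dom_is_valid_fen fen_str → Spec_is_valid_fen fen_str (is_valid_fen fen_str)

-- ===== LEMMAS AND PROOFS =====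

-- What B's streaming pass computes over a finished word list, one field at a time.
def pvValidTail : Nat → List (List Char) → Bool
  | k, [] => k == 6
  | k, w :: ws => decide (k < 6) && pvOkField k w && pvValidTail (k + 1) ws

-- B's finishing step, as a function of the loop's final state.
def pvFinish (st : Nat × List Char × Bool) : Bool :=
  if st.2.1.isEmpty then st.2.2 && (st.1 == 6)
  else (st.2.2 && decide (st.1 < 6) && pvOkField st.1 st.2.1) && (st.1 + 1 == 6)

-- Equation lemmas for the two recursions.
theorem pvLoop_nil (k : Nat) (cur : List Char) (good : Bool) :
    pvLoop [] k cur good = (k, cur, good) := rfl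

theorem pvLoop_cons (c : Char) (rest : List Char) (k : Nat) (cur : List Char) (good : Bool) :
    pvLoop (c :: rest) k cur good =
      if PySem.Chars.isspace c then
        if cur.isEmpty then pvLoop rest k cur good
        else pvLoop rest (k + 1) [] (good && decide (k < 6) && pvOkField k cur)
      else pvLoop rest k (cur ++ [c]) good := rfl

theorem pv_go_nil (cur : List Char) (acc : List (List Char)) :
    PySem.Chars.split₀.go [] cur acc =
      if cur.isEmpty then acc.reverse else (cur.reverse :: acc).reverse := rfl

theorem pv_go_cons (c : Char) (rest cur : List Char) (acc : List (List Char)) :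
    PySem.Chars.split₀.go (c :: rest) cur acc =
      if PySem.Chars.isspace c then
        if cur.isEmpty then PySem.Chars.split₀.go rest [] acc
        else PySem.Chars.split₀.go rest [] (cur.reverse :: acc)
      else PySem.Chars.split₀.go rest (c :: cur) acc := rfl

theorem pv_go_acc (s : List Char) (cur : List Char) (acc : List (List Char)) :
    PySem.Chars.split₀.go s cur acc = acc.reverse ++ PySem.Chars.split₀.go s cur [] := by
  induction s generalizing cur acc with
  | nil => by_cases h : cur.isEmpty <;> simp [pv_go_nil, h]
  | cons c rest ih =>
    by_cases hs : PySem.Chars.isspace c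
    · rw [pv_go_cons, pv_go_cons, if_pos hs, if_pos hs]
      by_cases h : cur.isEmpty
      · rw [if_pos h, if_pos h]; exact ih [] acc
      · rw [if_neg h, if_neg h, ih [] (cur.reverse :: acc), ih [] [cur.reverse]]
        simp
    · rw [pv_go_cons, pv_go_cons, if_neg hs, if_neg hs]
      exact ih (c :: cur) acc

-- Main invariant: the streaming pass agrees with tokenize-then-check.
theorem pv_loop_invariant (s : List Char) (k : Nat) (cur : List Char) (good : Bool) :
    pvFinish (pvLoop s k cur good) =
      (good && pvValidTail k (PySem.Chars.split₀.go s cur.reverse [])) := by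
  induction s generalizing k cur good with
  | nil =>
    rw [pvLoop_nil, pv_go_nil]
    by_cases h : cur.isEmpty
    · have hc : cur = [] := by simpa using h
      subst hc
      simp [pvFinish, pvValidTail]
    · have hr : ¬ (cur.reverse.isEmpty = true) := by simpa using h
      rw [if_neg hr]
      simp [pvFinish, h, pvValidTail, Bool.and_assoc]
  | cons c rest ih =>
    by_cases hs : PySem.Chars.isspace c
    · by_cases h : cur.isEmpty
      · have hc : cur = [] := by simpa using h
        subst hc
        rw [pvLoop_cons, if_pos hs, if_pos h, ih, pv_go_cons, if_pos hs,
          if_pos (show (List.reverse ([] : List Char)).isEmpty = true from rfl)]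
        simp
      · have hr : ¬ ((cur.reverse).isEmpty = true) := by simpa using h
        rw [pvLoop_cons, if_pos hs, if_neg h, ih, pv_go_cons, if_pos hs, if_neg hr]
        rw [pv_go_acc rest [] (cur.reverse.reverse :: [])]
        simp [pvValidTail, Bool.and_assoc]
    · rw [pvLoop_cons, if_neg hs, ih, pv_go_cons, if_neg hs]
      have hrev : (cur ++ [c]).reverse = c :: cur.reverse := by simp
      rw [hrev]

theorem pv_alt_eq (fen_str : String) :
    is_valid_fen_alt fen_str = pvValidTail 0 (PySem.Chars.split₀ fen_str.toList) := by
  have h := pv_loop_invariant fen_str.toList 0 [] true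
  simpa [is_valid_fen_alt, pvFinish, PySem.Chars.split₀] using h

-- A guard chain 'if not bᵢ: return False' equals the conjunction of its guards.
theorem pv_chain (n : Nat) (b1 b2 b3 b4 b5 b6 : Bool) :
    (if n != 6 then false
     else if !b1 then false else if !b2 then false else if !b3 then false
     else if !b4 then false else if !b5 then false else if !b6 then false else true) =
    ((n == 6) && (b1 && (b2 && (b3 && (b4 && (b5 && b6)))))) := by
  by_cases h : n = 6 <;>
    simp [h] <;> cases b1 <;> cases b2 <;> cases b3 <;> cases b4 <;> cases b5 <;> cases b6 <;> rfl

-- String-level == against a literal reduces to the character lists.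
theorem pv_ofList_beq (l : List Char) (s : String) :
    (String.ofList l == s) = (l == s.toList) := by
  simp
  constructor
  · intro h; subst h; simp
  · intro h; subst h; simp

-- Python's len() is an Int; compare with the Nat length.
theorem pv_cast2 (n : Nat) : ((n : Int) == 2) = (n == 2) := by
  by_cases h : n = 2 <;> simp [h] <;> omega


-- A's six checks over the split word list equal B's field-indexed recursion.
theorem pv_validTail_eq (ws : List (List Char)) :
    ((ws.map String.ofList).length == 6 &&
     (((PySem.List.pyGetD (ws.map String.ofList) 0 "").toList.all
        (fun ch => "rnbqkpRNBQKP/".toList.contains ch || PySem.Chars.isdigit ch)) &&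
      (((PySem.List.pyGetD (ws.map String.ofList) 1 "") == "w" || (PySem.List.pyGetD (ws.map String.ofList) 1 "") == "b") &&
       (((PySem.List.pyGetD (ws.map String.ofList) 2 "").toList.all
          (fun ch => "-KkQq".toList.contains ch)) &&
        (((PySem.List.pyGetD (ws.map String.ofList) 3 "") == "-" ||
          (PySem.Str.len (PySem.List.pyGetD (ws.map String.ofList) 3 "") == 2 &&
           (match PySem.Str.pyGet? (PySem.List.pyGetD (ws.map String.ofList) 3 "") 0 with
            | some c => "abcdefgh".toList.contains c | none => false) &&
           (match PySem.Str.pyGet? (PySem.List.pyGetD (ws.map String.ofList) 3 "") 1 with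
            | some c => "12345678".toList.contains c | none => false))) &&
         ((PySem.Str.strIsdigit (PySem.List.pyGetD (ws.map String.ofList) 4 "")) &&
          (PySem.Str.strIsdigit (PySem.List.pyGetD (ws.map String.ofList) 5 "")))))))) =
    pvValidTail 0 ws := by
  rcases ws with _ | ⟨a, _ | ⟨b, _ | ⟨c, _ | ⟨d, _ | ⟨e, _ | ⟨f, _ | ⟨g, rest⟩⟩⟩⟩⟩⟩⟩ <;>
    simp [pvValidTail, pvOkField, PySem.List.pyGetD, pv_ofList_beq,
      String.toList_ofList, pv_cast2, Bool.and_assoc]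

theorem pv_a_eq (fen_str : String) :
    is_valid_fen fen_str = pvValidTail 0 (PySem.Chars.split₀ fen_str.toList) := by
  unfold is_valid_fen
  rw [pv_chain]
  have hsplit : PySem.Str.split₀ fen_str = (PySem.Chars.split₀ fen_str.toList).map String.ofList := rfl
  rw [hsplit]
  exact pv_validTail_eq (PySem.Chars.split₀ fen_str.toList)

-- ===== VERDICT =====
theorem is_valid_fen_spec : Claim_equal_is_valid_fen := by
  intro fen_str _
  unfold Spec_is_valid_fen
  rw [pv_a_eq, pv_alt_eq]
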